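-- pv_equiv track=rewrite | github.com/Sicambr/Dani_ap | Rude_mistakes.py | arg_read
-- ===== SOURCE A (Python) =====
-- def arg_read(stroka):
--     arguments = []
--     i = 0
--     numbers = '#-.0123456789'
--     arg = ''
--     while i < len(stroka):
--         if stroka[i] == '(':
--             arguments.append(arg)
--             i = len(stroka)
--         elif stroka[i] not in numbers:
--             arguments.append(arg)
--             arg = stroka[i]
--         else:
--             arg = arg+stroka[i]
--         i += 1
--     if len(arguments) > 0:
--         arguments.pop(0)
--     return arguments
-- ===== SOURCE B (Python) =====
-- def arg_read(stroka):
--     numbers = '#-.0123456789'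
--     par = stroka.find('(')
--     head = stroka if par < 0 else stroka[:par]
--     n = len(head)
--     i = 0
--     while i < n and head[i] in numbers:   # skip the leading number-run
--         i += 1
--     toks = []
--     while i < n:                          # cut one token per step: char + its number-run
--         j = i + 1
--         while j < n and head[j] in numbers:
--             j += 1
--         toks.append(head[i:j])
--         i = j
--     return toks if par >= 0 else toks[:-1]
-- ===== Notes on version B (the rewrite author's own statement) =====
-- stated objective: alternative
-- what changed: Replaces A's single-pass state machine (token accumulator, append-then-pop(0), early exit inside the loop) with: split the string at the first '(', strip the leading number-run, then recursively slice off one token (a non-number char plus its following run of number chars) at a time, dropping the last token when there is no '('.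
import Mathlib
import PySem

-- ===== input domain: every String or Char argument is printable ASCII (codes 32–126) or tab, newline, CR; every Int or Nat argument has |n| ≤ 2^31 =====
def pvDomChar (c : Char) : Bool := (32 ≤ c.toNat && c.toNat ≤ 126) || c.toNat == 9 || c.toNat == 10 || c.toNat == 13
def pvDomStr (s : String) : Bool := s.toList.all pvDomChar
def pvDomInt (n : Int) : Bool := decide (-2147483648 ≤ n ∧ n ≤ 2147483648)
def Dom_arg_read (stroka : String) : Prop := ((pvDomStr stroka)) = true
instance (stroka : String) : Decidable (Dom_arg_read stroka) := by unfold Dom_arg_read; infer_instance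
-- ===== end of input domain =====

-- B replaces A's one-pass state machine (accumulator + pop(0)) with: split at the first '(',
-- strip the leading number-run, then recursively cut off one token (non-number char plus its
-- number-run) at a time, dropping the last token when there is no '(' (objective: alternative).

-- ===== PORT A =====
-- numbers = '#-.0123456789'
def pvNumbers : List Char := "#-.0123456789".toList

-- the while loop of A: state = (arg, arguments); setting i = len(stroka) exits the loop
def argReadLoop (cs : List Char) (arg : List Char) (acc : List String) : List String :=
  match cs with
  | [] => acc
  | c :: rest =>
      if c = '(' then acc ++ [String.mk arg]
      else if !(pvNumbers.contains c) then argReadLoop rest [c] (acc ++ [String.mk arg])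
      else argReadLoop rest (arg ++ [c]) acc

def arg_read (stroka : String) : List String :=
  let arguments := argReadLoop stroka.toList [] []
  match arguments with          -- if len(arguments) > 0: arguments.pop(0)
  | [] => []
  | _ :: t => t

-- ===== PORT B =====
-- tokens(rest): first char plus its run of number chars, then recurse on the remainder
def altTokens (rest : List Char) : List String :=
  match rest with
  | [] => []
  | c :: rs =>
      String.mk (c :: rs.takeWhile (fun d => pvNumbers.contains d))
        :: altTokens (rs.dropWhile (fun d => pvNumbers.contains d))
termination_by rest.length
decreasing_by
  simp only [List.length_cons]
  exact Nat.lt_succ_of_le (List.length_dropWhile_le _ _)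

def arg_read_alt (stroka : String) : List String :=
  let cs := stroka.toList
  let par := cs.contains '('                    -- stroka.find('(') ≥ 0
  let head := if par then cs.takeWhile (· ≠ '(') else cs
  let toks := altTokens (head.dropWhile (fun d => pvNumbers.contains d))
  if par then toks else toks.dropLast

-- ===== PRECONDITION & SPEC =====
def Spec_arg_read (stroka : String) (out : List String) : Prop := out = arg_read_alt stroka
instance (stroka : String) (out : List String) : Decidable (Spec_arg_read stroka out) := by unfold Spec_arg_read; infer_instance

-- ===== CLAIM (what is proved, stated in full; the proofs are below) =====
def Claim_equal_arg_read : Prop := ∀ (stroka : String), Dom_arg_read stroka → Spec_arg_read stroka (arg_read stroka)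

-- ===== LEMMAS AND PROOFS =====

-- A's loop restated as "the appended tokens followed by the final arg"
def gTok (head : List Char) (arg : List Char) : List String :=
  match head with
  | [] => [String.mk arg]
  | c :: cs =>
      if !(pvNumbers.contains c) then String.mk arg :: gTok cs [c]
      else gTok cs (arg ++ [c])

theorem gTok_ne_nil (head arg : List Char) : gTok head arg ≠ [] := by
  induction head generalizing arg with
  | nil => simp [gTok]
  | cons c cs ih =>
      unfold gTok
      split
      · simp
      · exact ih _

theorem loop_eq (cs : List Char) : ∀ arg acc, argReadLoop cs arg acc =
    acc ++ (if cs.contains '(' then gTok (cs.takeWhile (· ≠ '(')) arg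
            else (gTok cs arg).dropLast) := by
  induction cs with
  | nil => intro arg acc; simp [argReadLoop, gTok]
  | cons c rest ih =>
      intro arg acc
      by_cases hp : c = '('
      · subst hp
        simp [argReadLoop, gTok]
      · by_cases hn : c ∈ pvNumbers
        · have h1 : argReadLoop (c :: rest) arg acc = argReadLoop rest (arg ++ [c]) acc := by
            simp [argReadLoop, hp, hn]
          have h2 : gTok (c :: rest) arg = gTok rest (arg ++ [c]) := by
            simp [gTok, hn]
          rw [h1, ih]
          have h3 : (c :: rest).contains '(' = rest.contains '(' := by
            simp [List.contains_cons, Ne.symm hp]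
          have h4 : (c :: rest).takeWhile (· ≠ '(') = c :: rest.takeWhile (· ≠ '(') := by
            simp [List.takeWhile_cons, hp]
          rw [h3, h4]
          by_cases hr : rest.contains '(' = true
          · simp only [hr, if_true]
            rw [show gTok (c :: rest.takeWhile (· ≠ '(')) arg
                  = gTok (rest.takeWhile (· ≠ '(')) (arg ++ [c]) by simp [gTok, hn]]
          · simp only [hr, Bool.false_eq_true, if_false]
            rw [h2]
        · have h1 : argReadLoop (c :: rest) arg acc
              = argReadLoop rest [c] (acc ++ [String.mk arg]) := by
            simp [argReadLoop, hp, hn]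
          have h2 : gTok (c :: rest) arg = String.mk arg :: gTok rest [c] := by
            simp [gTok, hn]
          have h3 : (c :: rest).contains '(' = rest.contains '(' := by
            simp [List.contains_cons, Ne.symm hp]
          have h4 : (c :: rest).takeWhile (· ≠ '(') = c :: rest.takeWhile (· ≠ '(') := by
            simp [List.takeWhile_cons, hp]
          rw [h1, ih, h3, h4, h2]
          by_cases hr : rest.contains '(' = true
          · simp only [hr, if_true, List.append_assoc, List.singleton_append]
            rw [show gTok (c :: rest.takeWhile (· ≠ '(')) arg
                  = String.mk arg :: gTok (rest.takeWhile (· ≠ '(')) [c] by simp [gTok, hn]]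
          · simp only [hr, Bool.false_eq_true, if_false, List.append_assoc, List.singleton_append]
            rw [List.dropLast_cons_of_ne_nil (gTok_ne_nil _ _)]

theorem gTok_span (head : List Char) : ∀ arg, gTok head arg =
    String.mk (arg ++ head.takeWhile (fun d => pvNumbers.contains d))
      :: altTokens (head.dropWhile (fun d => pvNumbers.contains d)) := by
  induction head with
  | nil => intro arg; simp [gTok, altTokens]
  | cons c cs ih =>
      intro arg
      by_cases hn : c ∈ pvNumbers
      · have h1 : gTok (c :: cs) arg = gTok cs (arg ++ [c]) := by simp [gTok, hn]
        have h2 : (c :: cs).takeWhile (fun d => pvNumbers.contains d)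
            = c :: cs.takeWhile (fun d => pvNumbers.contains d) := by
          simp [List.takeWhile_cons, hn]
        have h3 : (c :: cs).dropWhile (fun d => pvNumbers.contains d)
            = cs.dropWhile (fun d => pvNumbers.contains d) := by
          simp [List.dropWhile_cons, hn]
        rw [h1, ih, h2, h3]
        simp
      · have h1 : gTok (c :: cs) arg = String.mk arg :: gTok cs [c] := by simp [gTok, hn]
        have h2 : (c :: cs).takeWhile (fun d => pvNumbers.contains d) = [] := by
          simp [List.takeWhile_cons, hn]
        have h3 : (c :: cs).dropWhile (fun d => pvNumbers.contains d) = c :: cs := by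
          simp [List.dropWhile_cons, hn]
        rw [h1, ih, h2, h3, List.append_nil]
        conv_rhs => rw [altTokens]
        simp

-- ===== VERDICT (by name: the statement is the Claim_ definition above) =====
theorem arg_read_spec : Claim_equal_arg_read := by
  intro stroka _
  unfold Spec_arg_read arg_read arg_read_alt
  rw [loop_eq]
  by_cases hp : stroka.toList.contains '(' = true
  · simp only [hp, if_true, List.nil_append]
    rw [gTok_span]
  · simp only [hp, Bool.false_eq_true, if_false, List.nil_append]
    rw [gTok_span]
    cases h : altTokens (stroka.toList.dropWhile (fun d => pvNumbers.contains d)) with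
    | nil => simp
    | cons y t =>
        rw [List.dropLast_cons_of_ne_nil (by simp)]
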